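-- pv_equiv track=rewrite | github.com/danielmtro/PoliticalPolarisation | mentions_matrix_coawareness.py | check_mentions
-- ===== SOURCE A (Python) =====
-- def check_mentions(headlines: list, target_orgs: list) -> int:
--     """ Count how many times target organizations are mentioned in the headlines. """
--     mention_count = 0
--     for headline in headlines:
--         for org in target_orgs:
--             if org in headline:
--                 mention_count += 1
--                 break  # Exit the inner loop once a mention is found
--     return mention_count
-- ===== SOURCE B (Python) =====
-- def check_mentions(headlines: list, target_orgs: list) -> int:
--     """ Count how many times target organizations are mentioned in the headlines. """
--     remaining = list(headlines)  # headlines with no mention found so far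
--     for org in target_orgs:
--         if not remaining:
--             break
--         remaining = [h for h in remaining if org not in h]
--     return len(headlines) - len(remaining)
-- ===== Notes on version B (the rewrite author's own statement) =====
-- stated objective: alternative
-- what changed: B counts subtractively by a filter cascade: it keeps the list of still-unmentioned headlines, removes per org (org-major, with an early stop once the list is empty) every headline containing that org, and returns len(headlines) minus the survivors, instead of A's headline-major counter loop with a break on the first matching org.
import Mathlib
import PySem

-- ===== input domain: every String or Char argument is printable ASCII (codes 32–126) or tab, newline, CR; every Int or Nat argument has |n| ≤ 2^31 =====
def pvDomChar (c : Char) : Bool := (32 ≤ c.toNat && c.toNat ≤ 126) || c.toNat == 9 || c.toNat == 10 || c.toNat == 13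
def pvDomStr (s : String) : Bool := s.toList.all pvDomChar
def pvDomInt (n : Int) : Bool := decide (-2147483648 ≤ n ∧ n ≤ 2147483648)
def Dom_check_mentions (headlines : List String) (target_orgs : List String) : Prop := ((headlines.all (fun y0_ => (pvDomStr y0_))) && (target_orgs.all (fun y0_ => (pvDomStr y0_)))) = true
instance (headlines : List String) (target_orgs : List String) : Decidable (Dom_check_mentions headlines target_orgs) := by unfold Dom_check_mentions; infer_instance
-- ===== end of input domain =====

-- B counts subtractively: an org-major filter cascade over the still-unmentioned headlines (early stop when empty), returning total minus survivors; alternative structure, no speed claim.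

-- ===== PORT A =====
-- inner 'for org in target_orgs: if org in headline: mention_count += 1; break'
def cmInner (headline : String) (mention_count : Int) : List String → Int
  | [] => mention_count
  | org :: rest =>
      if PySem.Str.isIn org headline then mention_count + 1
      else cmInner headline mention_count rest

def check_mentions (headlines : List String) (target_orgs : List String) : Int :=
  headlines.foldl (fun mention_count headline => cmInner headline mention_count target_orgs) 0

-- ===== PORT B =====
-- 'for org in target_orgs: if not remaining: break; remaining = [h for h in remaining if org not in h]'
def cmSieve : List String → List String → List String
  | remaining, [] => remaining
  | remaining, org :: rest =>
      if remaining.isEmpty then remaining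
      else cmSieve (remaining.filter (fun h => !PySem.Str.isIn org h)) rest

def check_mentions_alt (headlines : List String) (target_orgs : List String) : Int :=
  PySem.List.len headlines - PySem.List.len (cmSieve headlines target_orgs)

-- ===== PRECONDITION & SPEC =====
def Spec_check_mentions (headlines : List String) (target_orgs : List String) (out : Int) : Prop := out = check_mentions_alt headlines target_orgs
instance (headlines : List String) (target_orgs : List String) (out : Int) : Decidable (Spec_check_mentions headlines target_orgs out) := by unfold Spec_check_mentions; infer_instance

-- ===== CLAIM (what is proved, stated in full; the proofs are below) =====
def Claim_equal_check_mentions : Prop := ∀ (headlines : List String) (target_orgs : List String), Dom_check_mentions headlines target_orgs → Spec_check_mentions headlines target_orgs (check_mentions headlines target_orgs)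

-- ===== LEMMAS AND PROOFS =====

-- A side: the inner loop adds 1 exactly when some org occurs in the headline
theorem cmInner_eq (h : String) (c : Int) (orgs : List String) :
    cmInner h c orgs = c + (if orgs.any (fun org => PySem.Str.isIn org h) then 1 else 0) := by
  induction orgs with
  | nil => simp [cmInner]
  | cons org rest ih =>
      show (if PySem.Str.isIn org h then c + 1 else cmInner h c rest) = _
      by_cases hc : PySem.Str.isIn org h = true
      · rw [if_pos hc, List.any_cons, hc]
        simp
      · have hf : PySem.Str.isIn org h = false := Bool.eq_false_iff.2 hc
        rw [if_neg hc, ih, List.any_cons, hf]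
        simp

theorem foldl_count (p : String → Bool) (hs : List String) (c : Int) :
    hs.foldl (fun acc h => acc + (if p h then 1 else 0)) c
      = c + ((hs.filter p).length : Int) := by
  induction hs generalizing c with
  | nil => simp
  | cons h t ih =>
      by_cases hc : p h = true <;> simp [List.filter, hc, ih] <;> ring

-- B side: the sieve is the filter by 'no org occurs'
theorem cmSieve_eq (orgs : List String) (rem : List String) :
    cmSieve rem orgs
      = rem.filter (fun h => !(orgs.any (fun org => PySem.Str.isIn org h))) := by
  induction orgs generalizing rem with
  | nil => simp [cmSieve]
  | cons org rest ih =>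
      show (if rem.isEmpty then rem
            else cmSieve (rem.filter (fun h => !PySem.Str.isIn org h)) rest) = _
      by_cases he : rem.isEmpty
      · rw [if_pos he, List.isEmpty_iff.1 he]
        simp
      · rw [if_neg he, ih, List.filter_filter]
        simp only [List.any_cons, Bool.not_or, Bool.and_comm]

theorem length_filter_not (q : String → Bool) (l : List String) :
    l.length = (l.filter q).length + (l.filter (fun h => !q h)).length := by
  induction l with
  | nil => simp
  | cons h t ih =>
      by_cases hc : q h = true <;> simp [List.filter, hc, ih] <;> omega

-- ===== VERDICT (by name: the statement is the Claim_ definition above) =====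
theorem check_mentions_spec : Claim_equal_check_mentions := by
  intro headlines target_orgs _
  unfold Spec_check_mentions
  have hA : check_mentions headlines target_orgs
      = ((headlines.filter
          (fun h => target_orgs.any (fun org => PySem.Str.isIn org h))).length : Int) := by
    unfold check_mentions
    have he : (fun (c : Int) (h : String) => cmInner h c target_orgs)
        = fun c h => c + (if target_orgs.any (fun org => PySem.Str.isIn org h) then 1 else 0) := by
      funext c h
      rw [cmInner_eq]
    rw [he, foldl_count]
    simp
  have hB : check_mentions_alt headlines target_orgs
      = (headlines.length : Int)
        - ((headlines.filter
            (fun h => !(target_orgs.any (fun org => PySem.Str.isIn org h)))).length : Int) := by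
    unfold check_mentions_alt
    rw [cmSieve_eq]
    simp [PySem.List.len_eq]
  have hc := length_filter_not
    (fun h => target_orgs.any (fun org => PySem.Str.isIn org h)) headlines
  rw [hA, hB]
  omega
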